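-- pv_equiv track=rewrite | github.com/tahamhl/python-mixed | kelime_karistirma.py | ipucu_ver
-- ===== SOURCE A (Python) =====
-- def ipucu_ver(kelime, gosterilen_harfler):
--     ipucu = ""
--     for i, harf in enumerate(kelime):
--         if i < gosterilen_harfler:
--             ipucu += harf
--         else:
--             ipucu += "_"
--     return ipucu
-- ===== SOURCE B (Python) =====
-- def ipucu_ver(kelime, gosterilen_harfler):
--     reveal = max(0, min(gosterilen_harfler, len(kelime)))
--     return kelime[:reveal] + "_" * (len(kelime) - reveal)
-- ===== Notes on version B (the rewrite author's own statement) =====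
-- stated objective: simpler
-- what changed: Replaced the per-character enumerate loop with repeated string concatenation by a closed-form clamp: one slice of the first reveal characters plus one underscore-repetition.
import Mathlib
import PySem

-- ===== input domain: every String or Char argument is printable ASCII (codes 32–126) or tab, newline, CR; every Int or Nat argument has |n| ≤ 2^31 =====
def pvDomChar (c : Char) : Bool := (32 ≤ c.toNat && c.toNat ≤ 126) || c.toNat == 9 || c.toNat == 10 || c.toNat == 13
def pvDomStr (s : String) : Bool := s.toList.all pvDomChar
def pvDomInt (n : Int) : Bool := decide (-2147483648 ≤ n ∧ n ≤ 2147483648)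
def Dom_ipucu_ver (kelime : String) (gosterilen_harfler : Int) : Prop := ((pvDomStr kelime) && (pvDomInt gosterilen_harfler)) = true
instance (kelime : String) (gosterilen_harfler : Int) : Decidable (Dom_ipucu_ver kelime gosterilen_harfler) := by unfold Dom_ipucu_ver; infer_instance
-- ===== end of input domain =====

-- B replaces A's per-character enumerate loop by a closed-form clamp: slice the
-- first `reveal` characters and append the right number of underscores (simpler).

-- ===== PORT A =====
-- A's loop: for i, harf in enumerate(kelime): ipucu += harf if i < g else "_"
def ipucuLoopA : List Char → Int → Int → String → String
  | [], _, _, acc => acc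
  | c :: cs, i, g, acc =>
      ipucuLoopA cs (i + 1) g (if i < g then acc.push c else acc.push '_')

def ipucu_ver (kelime : String) (gosterilen_harfler : Int) : String :=
  ipucuLoopA kelime.toList 0 gosterilen_harfler ""

-- ===== PORT B =====
def ipucu_ver_alt (kelime : String) (gosterilen_harfler : Int) : String :=
  let n : Int := (kelime.toList.length : Int)
  let reveal : Int := max 0 (min gosterilen_harfler n)
  String.ofList (kelime.toList.take reveal.toNat ++ List.replicate (n - reveal).toNat '_')

-- ===== PRECONDITION & SPEC =====
def Spec_ipucu_ver (kelime : String) (gosterilen_harfler : Int) (out : String) : Prop := out = ipucu_ver_alt kelime gosterilen_harfler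
instance (kelime : String) (gosterilen_harfler : Int) (out : String) : Decidable (Spec_ipucu_ver kelime gosterilen_harfler out) := by unfold Spec_ipucu_ver; infer_instance

-- ===== CLAIM (what is proved, stated in full; the proofs are below) =====
def Claim_equal_ipucu_ver : Prop := ∀ (kelime : String) (gosterilen_harfler : Int), Dom_ipucu_ver kelime gosterilen_harfler → Spec_ipucu_ver kelime gosterilen_harfler (ipucu_ver kelime gosterilen_harfler)

-- ===== LEMMAS AND PROOFS =====

-- the list actually produced by A's loop starting at index i
def ipucuMask : List Char → Int → Int → List Char
  | [], _, _ => []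
  | c :: cs, i, g => (if i < g then c else '_') :: ipucuMask cs (i + 1) g

theorem ipucuLoopA_toList (l : List Char) (i g : Int) (acc : String) :
    (ipucuLoopA l i g acc).toList = acc.toList ++ ipucuMask l i g := by
  induction l generalizing i acc with
  | nil => simp [ipucuLoopA, ipucuMask]
  | cons c cs ih =>
      simp only [ipucuLoopA, ipucuMask]
      split_ifs with h <;> rw [ih] <;> simp

theorem ipucuMask_shift (l : List Char) (i g : Int) :
    ipucuMask l i g = ipucuMask l 0 (g - i) := by
  induction l generalizing i g with
  | nil => rfl
  | cons c cs ih =>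
      simp only [ipucuMask, zero_add]
      rw [ih (i + 1) g, ih 1 (g - i), show g - (i + 1) = g - i - 1 from by omega]
      simp only [show (i < g) ↔ (0 < g - i) from by omega]

theorem ipucuMask_closed (l : List Char) (g : Int) :
    ipucuMask l 0 g =
      l.take (max 0 (min g (l.length : Int))).toNat
        ++ List.replicate ((l.length : Int) - max 0 (min g (l.length : Int))).toNat '_' := by
  induction l generalizing g with
  | nil => simp [ipucuMask]
  | cons c cs ih =>
      simp only [ipucuMask, zero_add]
      rw [ipucuMask_shift cs 1 g, ih (g - 1)]
      by_cases h : (0 : Int) < g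
      · have h1 : (max 0 (min g ((c :: cs).length : Int))).toNat
            = (max 0 (min (g - 1) ((cs.length : Int)))).toNat + 1 := by
          simp only [List.length_cons]; omega
        have h2 : (((c :: cs).length : Int) - max 0 (min g ((c :: cs).length : Int))).toNat
            = ((cs.length : Int) - max 0 (min (g - 1) (cs.length : Int))).toNat := by
          simp only [List.length_cons]; omega
        rw [h1, h2]
        simp [h]
      · have h1 : (max 0 (min g ((c :: cs).length : Int))).toNat = 0 := by
          simp only [List.length_cons]; omega
        have h3 : (max 0 (min (g - 1) ((cs.length : Int)))).toNat = 0 := by omega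
        have h2 : (((c :: cs).length : Int) - max 0 (min g ((c :: cs).length : Int))).toNat
            = ((cs.length : Int) - max 0 (min (g - 1) (cs.length : Int))).toNat + 1 := by
          simp only [List.length_cons]; omega
        rw [h1, h2, h3]
        simp [h, List.replicate_succ]

-- ===== VERDICT (by name: the statement is the Claim_ definition above) =====
theorem ipucu_ver_spec : Claim_equal_ipucu_ver := by
  intro kelime g _
  unfold Spec_ipucu_ver ipucu_ver ipucu_ver_alt
  apply String.toList_inj.mp
  rw [ipucuLoopA_toList, ipucuMask_closed]
  simp
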